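-- pv_equiv track=rewrite | github.com/alan-turing-institute/advent-of-code-2024 | day-12/gpt_jack/part2.py | calculate_sides_and_area
-- ===== SOURCE A (Python) =====
-- from collections import deque
--
-- def calculate_sides_and_area(region_cells, grid):
--     rows, cols = len(grid), len(grid[0])
--
--     # Use sets to track unique continuous horizontal and vertical sides
--     horizontal_sides = set()
--     vertical_sides = set()
--
--     for x, y in region_cells:
--         # Horizontal sides
--         if y == 0 or grid[x][y - 1] != grid[x][y]:
--             horizontal_sides.add((x, y))
--         if y == cols - 1 or grid[x][y + 1] != grid[x][y]:
--             horizontal_sides.add((x, y + 1))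
--
--         # Vertical sides
--         if x == 0 or grid[x - 1][y] != grid[x][y]:
--             vertical_sides.add((x, y))
--         if x == rows - 1 or grid[x + 1][y] != grid[x][y]:
--             vertical_sides.add((x + 1, y))
--
--     # Count unique continuous segments
--     def count_continuous_sides(sides, is_horizontal=True):
--         side_count = 0
--         visited = set()
--
--         for side in sides:
--             if side not in visited:
--                 queue = deque([side])
--                 visited.add(side)
--
--                 while queue:
--                     current = queue.popleft()
--                     cx, cy = current
--
--                     # Move along the same line (horizontal or vertical)
--                     neighbors = []
--                     if is_horizontal:
--                         neighbors = [(cx, cy + 1), (cx, cy - 1)]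
--                     else:
--                         neighbors = [(cx + 1, cy), (cx - 1, cy)]
--
--                     for nx, ny in neighbors:
--                         if (nx, ny) in sides and (nx, ny) not in visited:
--                             visited.add((nx, ny))
--                             queue.append((nx, ny))
--
--                 side_count += 1
--
--         return side_count
--
--     horizontal_count = count_continuous_sides(horizontal_sides, is_horizontal=True)
--     vertical_count = count_continuous_sides(vertical_sides, is_horizontal=False)
--
--     sides = horizontal_count + vertical_count
--
--     # Area is the number of cells in the region
--     area = len(region_cells)
--
--     return area, sides
-- ===== SOURCE B (Python) =====
-- def _h_edges(x, y, grid, cols):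
--     out = []
--     if y == 0 or grid[x][y - 1] != grid[x][y]:
--         out.append((x, y))
--     if y == cols - 1 or grid[x][y + 1] != grid[x][y]:
--         out.append((x, y + 1))
--     return out
--
--
-- def _v_edges(x, y, grid, rows):
--     out = []
--     if x == 0 or grid[x - 1][y] != grid[x][y]:
--         out.append((x, y))
--     if x == rows - 1 or grid[x + 1][y] != grid[x][y]:
--         out.append((x + 1, y))
--     return out
--
--
-- def calculate_sides_and_area(region_cells, grid):
--     rows, cols = len(grid), len(grid[0])
--
--     # Collect the boundary markers per cell with helper functions and flatten
--     # them into sets (instead of A's in-place set-mutating loop).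
--     hs = {e for (x, y) in region_cells for e in _h_edges(x, y, grid, cols)}
--     vs = {e for (x, y) in region_cells for e in _v_edges(x, y, grid, rows)}
--
--     # A continuous segment is a run of consecutive coordinates along one axis;
--     # count each run once at its first element instead of flood-filling it.
--     sides = sum(1 for (x, y) in hs if (x, y - 1) not in hs) \
--           + sum(1 for (x, y) in vs if (x - 1, y) not in vs)
--
--     return len(region_cells), sides
-- ===== Notes on version B (the rewrite author's own statement) =====
-- stated objective: simpler
-- what changed: A's per-segment BFS flood fill (queue + visited set in count_continuous_sides) is replaced by a single membership pass that counts each continuous run of consecutive coordinates once at its first element, and the set-mutating boundary loop is replaced by set comprehensions over per-cell edge helpers.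
import Mathlib
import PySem

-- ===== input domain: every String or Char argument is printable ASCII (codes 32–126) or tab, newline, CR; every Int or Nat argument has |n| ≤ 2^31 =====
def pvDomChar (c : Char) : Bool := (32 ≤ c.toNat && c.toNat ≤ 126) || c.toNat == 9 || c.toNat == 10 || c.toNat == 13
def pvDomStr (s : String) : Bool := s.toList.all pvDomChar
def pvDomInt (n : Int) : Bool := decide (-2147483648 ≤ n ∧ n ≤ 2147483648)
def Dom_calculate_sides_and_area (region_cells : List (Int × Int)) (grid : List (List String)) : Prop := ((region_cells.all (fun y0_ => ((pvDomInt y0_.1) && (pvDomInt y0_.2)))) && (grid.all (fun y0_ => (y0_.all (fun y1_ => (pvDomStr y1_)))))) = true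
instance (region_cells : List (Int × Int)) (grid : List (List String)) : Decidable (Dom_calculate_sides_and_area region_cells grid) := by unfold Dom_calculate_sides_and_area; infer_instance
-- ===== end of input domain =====

-- B replaces A's set-mutating boundary loop by set comprehensions over per-cell
-- edge helpers, and A's per-segment BFS flood fill by a single pass that counts
-- each continuous segment once at its first coordinate (objective: simpler).

-- ===== PORT A =====

-- grid[x][y] with Python's negative-index semantics; none = IndexError (excluded by Pre_)
def pvCell (grid : List (List String)) (x y : Int) : Option String :=
  (PySem.List.pyGet? grid x).bind fun row => PySem.List.pyGet? row y

-- body of A's boundary-marking loop, one region cell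
def pvMarkStep (grid : List (List String)) (rows cols : Int)
    (st : PySem.Set (Int × Int) × PySem.Set (Int × Int)) (c : Int × Int) :
    PySem.Set (Int × Int) × PySem.Set (Int × Int) :=
  let x := c.1
  let y := c.2
  let hs1 := if y = 0 ∨ pvCell grid x (y - 1) ≠ pvCell grid x y then PySem.Set.add st.1 (x, y) else st.1
  let hs2 := if y = cols - 1 ∨ pvCell grid x (y + 1) ≠ pvCell grid x y then PySem.Set.add hs1 (x, y + 1) else hs1
  let vs1 := if x = 0 ∨ pvCell grid (x - 1) y ≠ pvCell grid x y then PySem.Set.add st.2 (x, y) else st.2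
  let vs2 := if x = rows - 1 ∨ pvCell grid (x + 1) y ≠ pvCell grid x y then PySem.Set.add vs1 (x + 1, y) else vs1
  (hs2, vs2)

-- A's boundary-marking loop
def pvMark (region_cells : List (Int × Int)) (grid : List (List String)) :
    PySem.Set (Int × Int) × PySem.Set (Int × Int) :=
  region_cells.foldl
    (pvMarkStep grid (grid.length : Int) (((PySem.List.pyGet? grid 0).getD []).length : Int))
    (PySem.Set.empty, PySem.Set.empty)

def pvNbrs (is_horizontal : Bool) (c : Int × Int) : List (Int × Int) :=
  if is_horizontal then [(c.1, c.2 + 1), (c.1, c.2 - 1)] else [(c.1 + 1, c.2), (c.1 - 1, c.2)]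

-- body of the inner neighbour loop of A's BFS
def pvPush (sides : PySem.Set (Int × Int))
    (qv : List (Int × Int) × PySem.Set (Int × Int)) (n : Int × Int) :
    List (Int × Int) × PySem.Set (Int × Int) :=
  if n ∈ sides ∧ n ∉ qv.2 then (qv.1 ++ [n], PySem.Set.add qv.2 n) else qv

-- termination measure bound for the BFS while-loop (used only by decreasing_by)
theorem pvPush_measure (sides : List (Int × Int)) (ns : List (Int × Int)) :
    ∀ (q v : List (Int × Int)),
      2 * (sides.toFinset \ (ns.foldl (pvPush sides) (q, v)).2.toFinset).card
          + (ns.foldl (pvPush sides) (q, v)).1.length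
        ≤ 2 * (sides.toFinset \ v.toFinset).card + q.length := by
  induction ns with
  | nil => intro q v; simp
  | cons n ns ih =>
    intro q v
    simp only [List.foldl_cons]
    by_cases h : n ∈ sides ∧ n ∉ v
    · have hadd : pvPush sides (q, v) n = (q ++ [n], v ++ [n]) := by
        simp [pvPush, h, PySem.Set.add]
      rw [hadd]
      refine (ih _ _).trans ?_
      have hmem : n ∈ sides.toFinset \ v.toFinset := by
        simp [List.mem_toFinset, h.1, h.2]
      have : sides.toFinset \ (v ++ [n]).toFinset = (sides.toFinset \ v.toFinset).erase n := by
        ext a; simp [List.mem_toFinset, Finset.mem_erase, Finset.mem_sdiff]; tauto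
      rw [this, Finset.card_erase_of_mem hmem]
      have hpos : 0 < (sides.toFinset \ v.toFinset).card := Finset.card_pos.mpr ⟨n, hmem⟩
      simp only [List.length_append, List.length_cons, List.length_nil]
      omega
    · have : pvPush sides (q, v) n = (q, v) := by simp [pvPush, h]
      rw [this]; exact ih _ _

-- A's inner while-loop (BFS along one axis)
def pvBfs (sides : PySem.Set (Int × Int)) (is_horizontal : Bool) :
    List (Int × Int) → PySem.Set (Int × Int) → PySem.Set (Int × Int)
  | [], visited => visited
  | c :: queue, visited =>
    let qv := (pvNbrs is_horizontal c).foldl (pvPush sides) (queue, visited)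
    pvBfs sides is_horizontal qv.1 qv.2
termination_by q v => 2 * (sides.toFinset \ v.toFinset).card + q.length
decreasing_by
  have := pvPush_measure sides (pvNbrs is_horizontal c) queue visited
  simp only [List.length_cons]
  omega

-- A's outer for-loop over the set of sides
def pvCountLoop (sides : PySem.Set (Int × Int)) (is_horizontal : Bool) :
    List (Int × Int) → PySem.Set (Int × Int) → Int → Int
  | [], _, cnt => cnt
  | s :: rest, visited, cnt =>
    if s ∈ visited then pvCountLoop sides is_horizontal rest visited cnt
    else pvCountLoop sides is_horizontal rest (pvBfs sides is_horizontal [s] (PySem.Set.add visited s)) (cnt + 1)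

def pvCountContinuous (sides : PySem.Set (Int × Int)) (is_horizontal : Bool) : Int :=
  pvCountLoop sides is_horizontal sides PySem.Set.empty 0

def calculate_sides_and_area (region_cells : List (Int × Int)) (grid : List (List String)) : Int × Int :=
  let sets := pvMark region_cells grid
  let horizontal_count := pvCountContinuous sets.1 true
  let vertical_count := pvCountContinuous sets.2 false
  ((region_cells.length : Int), horizontal_count + vertical_count)

-- ===== PORT B =====

-- _h_edges(x, y, grid, cols): the horizontal-side markers contributed by one cell
def pvHEdges (grid : List (List String)) (cols : Int) (c : Int × Int) : List (Int × Int) :=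
  (if c.2 = 0 ∨ pvCell grid c.1 (c.2 - 1) ≠ pvCell grid c.1 c.2 then [(c.1, c.2)] else []) ++
  (if c.2 = cols - 1 ∨ pvCell grid c.1 (c.2 + 1) ≠ pvCell grid c.1 c.2 then [(c.1, c.2 + 1)] else [])

-- _v_edges(x, y, grid, rows): the vertical-side markers contributed by one cell
def pvVEdges (grid : List (List String)) (rows : Int) (c : Int × Int) : List (Int × Int) :=
  (if c.1 = 0 ∨ pvCell grid (c.1 - 1) c.2 ≠ pvCell grid c.1 c.2 then [(c.1, c.2)] else []) ++
  (if c.1 = rows - 1 ∨ pvCell grid (c.1 + 1) c.2 ≠ pvCell grid c.1 c.2 then [(c.1 + 1, c.2)] else [])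

def calculate_sides_and_area_alt (region_cells : List (Int × Int)) (grid : List (List String)) : Int × Int :=
  let rows := (grid.length : Int)
  let cols := (((PySem.List.pyGet? grid 0).getD []).length : Int)
  let hs := PySem.Set.ofList (region_cells.flatMap (pvHEdges grid cols))
  let vs := PySem.Set.ofList (region_cells.flatMap (pvVEdges grid rows))
  let sides := ((hs.countP (fun c => decide ((c.1, c.2 - 1) ∉ hs))) : Int)
             + ((vs.countP (fun c => decide ((c.1 - 1, c.2) ∉ vs))) : Int)
  ((region_cells.length : Int), sides)

-- ===== PRECONDITION & SPEC =====
def pvCellOK (grid : List (List String)) (x y : Int) : Prop := (pvCell grid x y).isSome = true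

-- Pre_ excludes exactly the inputs where Python A raises: the empty grid
-- (len(grid[0]) is an IndexError) and region cells whose grid accesses are out
-- of range (IndexError); B raises identically there.
def Pre_calculate_sides_and_area (region_cells : List (Int × Int)) (grid : List (List String)) : Prop :=
  grid ≠ [] ∧ ∀ c ∈ region_cells,
    (c.2 = 0 ∨ (pvCellOK grid c.1 (c.2 - 1) ∧ pvCellOK grid c.1 c.2)) ∧
    (c.2 = (((PySem.List.pyGet? grid 0).getD []).length : Int) - 1 ∨ (pvCellOK grid c.1 (c.2 + 1) ∧ pvCellOK grid c.1 c.2)) ∧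
    (c.1 = 0 ∨ (pvCellOK grid (c.1 - 1) c.2 ∧ pvCellOK grid c.1 c.2)) ∧
    (c.1 = (grid.length : Int) - 1 ∨ (pvCellOK grid (c.1 + 1) c.2 ∧ pvCellOK grid c.1 c.2))
instance (region_cells : List (Int × Int)) (grid : List (List String)) : Decidable (Pre_calculate_sides_and_area region_cells grid) := by unfold Pre_calculate_sides_and_area pvCellOK; infer_instance

def pvWitness_calculate_sides_and_area : (List (Int × Int)) × List (List String) := ([(0, 0)], [["A"]])

def Spec_calculate_sides_and_area (region_cells : List (Int × Int)) (grid : List (List String)) (out : Int × Int) : Prop := out = calculate_sides_and_area_alt region_cells grid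
instance (region_cells : List (Int × Int)) (grid : List (List String)) (out : Int × Int) : Decidable (Spec_calculate_sides_and_area region_cells grid out) := by unfold Spec_calculate_sides_and_area; infer_instance

-- ===== CLAIM (what is proved, stated in full; the proofs are below) =====
def Claim_equal_calculate_sides_and_area : Prop := ∀ (region_cells : List (Int × Int)) (grid : List (List String)), Dom_calculate_sides_and_area region_cells grid → Pre_calculate_sides_and_area region_cells grid → Spec_calculate_sides_and_area region_cells grid (calculate_sides_and_area region_cells grid)

-- ===== LEMMAS AND PROOFS =====

-- line / coordinate view of a side: BFS with flag H moves along `pvCo`, fixing `pvLn`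
def pvLn (H : Bool) (c : Int × Int) : Int := if H then c.1 else c.2
def pvCo (H : Bool) (c : Int × Int) : Int := if H then c.2 else c.1
def pvMk (H : Bool) (l k : Int) : Int × Int := if H then (l, k) else (k, l)

theorem pvMk_ln_co (H : Bool) (c : Int × Int) : pvMk H (pvLn H c) (pvCo H c) = c := by
  cases H <;> rfl

theorem pvLn_mk (H : Bool) (l k : Int) : pvLn H (pvMk H l k) = l := by cases H <;> rfl
theorem pvCo_mk (H : Bool) (l k : Int) : pvCo H (pvMk H l k) = k := by cases H <;> rfl

theorem pvMk_inj (H : Bool) {l k l' k' : Int} : pvMk H l k = pvMk H l' k' ↔ l = l' ∧ k = k' := by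
  cases H
  · simp [pvMk, Prod.ext_iff]
    tauto
  · simp [pvMk, Prod.ext_iff]

theorem pvNbrs_eq (H : Bool) (c : Int × Int) :
    pvNbrs H c = [pvMk H (pvLn H c) (pvCo H c + 1), pvMk H (pvLn H c) (pvCo H c - 1)] := by
  cases H <;> rfl

-- c and d lie in the same continuous segment of S along axis H
def SameRun (H : Bool) (S : List (Int × Int)) (c d : Int × Int) : Prop :=
  c ∈ S ∧ d ∈ S ∧ pvLn H c = pvLn H d ∧
  ∀ k ∈ PySem.List.pyRange (min (pvCo H c) (pvCo H d)) (max (pvCo H c) (pvCo H d) + 1) 1, pvMk H (pvLn H c) k ∈ S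

-- executable form of SameRun (used by pvN; avoids instance declarations)
def sameRunB (H : Bool) (S : List (Int × Int)) (c d : Int × Int) : Bool :=
  decide (c ∈ S) && decide (d ∈ S) && decide (pvLn H c = pvLn H d) &&
  (PySem.List.pyRange (min (pvCo H c) (pvCo H d)) (max (pvCo H c) (pvCo H d) + 1) 1).all
    (fun k => decide (pvMk H (pvLn H c) k ∈ S))

theorem sameRunB_iff (H : Bool) (S : List (Int × Int)) (c d : Int × Int) :
    sameRunB H S c d = true ↔ SameRun H S c d := by
  unfold sameRunB SameRun
  simp [List.all_eq_true, and_assoc]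

theorem SameRun.refl (H : Bool) (S : List (Int × Int)) {c : Int × Int} (h : c ∈ S) : SameRun H S c c := by
  refine ⟨h, h, rfl, ?_⟩
  intro k hk
  rw [PySem.List.mem_pyRange_one] at hk
  have : k = pvCo H c := by omega
  rw [this, pvMk_ln_co]; exact h

theorem SameRun.symm {H : Bool} {S : List (Int × Int)} {c d : Int × Int} (h : SameRun H S c d) : SameRun H S d c := by
  obtain ⟨hc, hd, hl, hint⟩ := h
  refine ⟨hd, hc, hl.symm, ?_⟩
  intro k hk
  rw [PySem.List.mem_pyRange_one] at hk
  rw [← hl]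
  apply hint
  rw [PySem.List.mem_pyRange_one]
  omega

theorem SameRun.trans {H : Bool} {S : List (Int × Int)} {c d e : Int × Int}
    (h1 : SameRun H S c d) (h2 : SameRun H S d e) : SameRun H S c e := by
  obtain ⟨hc, hd, hl1, hint1⟩ := h1
  obtain ⟨_, he, hl2, hint2⟩ := h2
  refine ⟨hc, he, hl1.trans hl2, ?_⟩
  intro k hk
  rw [PySem.List.mem_pyRange_one] at hk
  by_cases h' : min (pvCo H c) (pvCo H d) ≤ k ∧ k ≤ max (pvCo H c) (pvCo H d)
  · exact hint1 k (by rw [PySem.List.mem_pyRange_one]; omega)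
  · rw [hl1]
    exact hint2 k (by rw [PySem.List.mem_pyRange_one]; omega)

-- adjacency: two consecutive members of S are in the same run
theorem sameRun_adj {H : Bool} {S : List (Int × Int)} {c d : Int × Int}
    (hc : c ∈ S) (hd : d ∈ S)
    (hadj : d = pvMk H (pvLn H c) (pvCo H c + 1) ∨ d = pvMk H (pvLn H c) (pvCo H c - 1)) :
    SameRun H S c d := by
  have hl : pvLn H c = pvLn H d := by
    rcases hadj with h | h <;> rw [h, pvLn_mk]
  have hco : pvCo H d = pvCo H c + 1 ∨ pvCo H d = pvCo H c - 1 := by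
    rcases hadj with h | h <;> rw [h, pvCo_mk] <;> [left; right] <;> rfl
  refine ⟨hc, hd, hl, ?_⟩
  intro k hk
  rw [PySem.List.mem_pyRange_one] at hk
  have : k = pvCo H c ∨ k = pvCo H d := by omega
  rcases this with h | h
  · rw [h, pvMk_ln_co]; exact hc
  · rw [h, hl, pvMk_ln_co]; exact hd

-- each nonempty run contains a start (least coordinate)
theorem countP_lt {α : Type} (l : List α) (p q : α → Bool)
    (himp : ∀ x ∈ l, p x = true → q x = true) (x0 : α) (hx0 : x0 ∈ l)
    (hp : p x0 = false) (hq : q x0 = true) : l.countP p < l.countP q := by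
  induction l with
  | nil => simp at hx0
  | cons a l ih =>
    simp only [List.countP_cons]
    rcases List.mem_cons.mp hx0 with rfl | hmem
    · have hle : l.countP p ≤ l.countP q :=
        List.countP_mono_left (fun x hx => himp x (List.mem_cons_of_mem _ hx))
      simp [hp, hq]
      omega
    · have hlt : l.countP p < l.countP q :=
        ih (fun x hx h => himp x (List.mem_cons_of_mem _ hx) h) hmem
      by_cases hpa : p a = true
      · simp [hpa, himp a List.mem_cons_self hpa]; omega
      · simp only [Bool.not_eq_true] at hpa
        simp [hpa]
        split <;> omega

theorem run_start_exists (H : Bool) (S : List (Int × Int)) :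
    ∀ (c : Int × Int), c ∈ S →
      ∃ t, SameRun H S c t ∧ pvMk H (pvLn H t) (pvCo H t - 1) ∉ S := by
  suffices h : ∀ (n : ℕ) (c : Int × Int), c ∈ S →
      (S.countP (fun d => decide (pvLn H d = pvLn H c ∧ pvCo H d < pvCo H c))) = n →
      ∃ t, SameRun H S c t ∧ pvMk H (pvLn H t) (pvCo H t - 1) ∉ S by
    intro c hc; exact h _ c hc rfl
  intro n
  induction n using Nat.strong_induction_on with
  | _ n ih =>
    intro c hc hn
    by_cases hprev : pvMk H (pvLn H c) (pvCo H c - 1) ∈ S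
    · set c' := pvMk H (pvLn H c) (pvCo H c - 1) with hc'
      have hlc' : pvLn H c' = pvLn H c := pvLn_mk H _ _
      have hcoc' : pvCo H c' = pvCo H c - 1 := pvCo_mk H _ _
      have hlt : S.countP (fun d => decide (pvLn H d = pvLn H c' ∧ pvCo H d < pvCo H c'))
          < S.countP (fun d => decide (pvLn H d = pvLn H c ∧ pvCo H d < pvCo H c)) := by
        refine countP_lt S _ _ ?_ c' hprev ?_ ?_
        · intro x hx h
          simp only [decide_eq_true_eq] at h ⊢
          exact ⟨h.1.trans hlc', by omega⟩
        · simp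
        · simp only [decide_eq_true_eq]; exact ⟨hlc', by omega⟩
      obtain ⟨t, ht1, ht2⟩ := ih _ (by omega) c' hprev rfl
      exact ⟨t, (sameRun_adj hc hprev (Or.inr rfl)).trans ht1, ht2⟩
    · exact ⟨c, SameRun.refl H S hc, hprev⟩

-- two starts of the same run are equal
theorem start_unique {H : Bool} {S : List (Int × Int)} {t t' : Int × Int}
    (ht : pvMk H (pvLn H t) (pvCo H t - 1) ∉ S) (ht' : pvMk H (pvLn H t') (pvCo H t' - 1) ∉ S)
    (h : SameRun H S t t') : t = t' := by
  obtain ⟨htS, ht'S, hl, hint⟩ := h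
  have heq : pvCo H t = pvCo H t' := by
    by_contra hne
    rcases lt_or_gt_of_ne hne with hlt | hgt
    · apply ht'
      have : pvMk H (pvLn H t) (pvCo H t' - 1) ∈ S := by
        apply hint; rw [PySem.List.mem_pyRange_one]; omega
      rwa [hl] at this
    · apply ht
      have : pvMk H (pvLn H t) (pvCo H t - 1) ∈ S := by
        apply hint; rw [PySem.List.mem_pyRange_one]; omega
      exact this
  calc t = pvMk H (pvLn H t) (pvCo H t) := (pvMk_ln_co H t).symm
    _ = pvMk H (pvLn H t') (pvCo H t') := by rw [hl, heq]
    _ = t' := pvMk_ln_co H t'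

-- nothing of a fresh interval is already in a run-closed visited set V
theorem interval_not_in_V (H : Bool) (S V : List (Int × Int)) (l y0 a b : Int)
    (hclo : ∀ c ∈ V, ∀ d ∈ S, (d = pvMk H (pvLn H c) (pvCo H c + 1) ∨ d = pvMk H (pvLn H c) (pvCo H c - 1)) → d ∈ V)
    (hsV : pvMk H l y0 ∉ V)
    (ha : a ≤ y0) (hb : y0 ≤ b)
    (hint : ∀ k, a ≤ k → k ≤ b → pvMk H l k ∈ S) :
    ∀ k, a ≤ k → k ≤ b → pvMk H l k ∉ V := by
  suffices h : ∀ (n : ℕ) (k : Int), a ≤ k → k ≤ b → (k - y0).natAbs = n → pvMk H l k ∉ V by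
    intro k h1 h2; exact h _ k h1 h2 rfl
  intro n
  induction n using Nat.strong_induction_on with
  | _ n ih =>
    intro k h1 h2 hn hmem
    rcases lt_trichotomy k y0 with hlt | rfl | hgt
    · have hnext : pvMk H l (k + 1) ∈ V := by
        apply hclo _ hmem _ (hint (k + 1) (by omega) (by omega))
        left; rw [pvLn_mk, pvCo_mk]
      exact ih ((k + 1 - y0).natAbs) (by omega) (k + 1) (by omega) (by omega) rfl hnext
    · exact hsV hmem
    · have hprev : pvMk H l (k - 1) ∈ V := by
        apply hclo _ hmem _ (hint (k - 1) (by omega) (by omega))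
        right; rw [pvLn_mk, pvCo_mk]
      exact ih ((k - 1 - y0).natAbs) (by omega) (k - 1) (by omega) (by omega) rfl hprev

-- BFS characterisation: starting from s with a run-closed visited set V,
-- the final visited set is V together with s's whole run
theorem bfs_char (H : Bool) (S V : List (Int × Int)) (l y0 : Int)
    (hS : pvMk H l y0 ∈ S)
    (hclo : ∀ c ∈ V, ∀ d ∈ S, (d = pvMk H (pvLn H c) (pvCo H c + 1) ∨ d = pvMk H (pvLn H c) (pvCo H c - 1)) → d ∈ V)
    (hsV : pvMk H l y0 ∉ V) :
    ∀ (queue visited : List (Int × Int)) (a b : Int),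
      a ≤ y0 → y0 ≤ b →
      (∀ k, a ≤ k → k ≤ b → pvMk H l k ∈ S) →
      (∀ c, c ∈ visited ↔ (c ∈ V ∨ ∃ k, a ≤ k ∧ k ≤ b ∧ c = pvMk H l k)) →
      (∀ c ∈ queue, ∃ k, a ≤ k ∧ k ≤ b ∧ c = pvMk H l k) →
      (pvMk H l (a - 1) ∈ S → pvMk H l a ∈ queue) →
      (pvMk H l (b + 1) ∈ S → pvMk H l b ∈ queue) →
      ∀ c, c ∈ pvBfs S H queue visited ↔ (c ∈ V ∨ SameRun H S (pvMk H l y0) c) := by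
  intro queue visited
  induction queue, visited using pvBfs.induct S H with
  | case1 visited =>
    intro a b ha hb hint hvisited hqueue hqa hqb c
    rw [pvBfs]
    have hnotlow : pvMk H l (a - 1) ∉ S := fun h => by simpa using hqa h
    have hnothigh : pvMk H l (b + 1) ∉ S := fun h => by simpa using hqb h
    rw [hvisited c]
    constructor
    · rintro (h | ⟨k, h1, h2, rfl⟩)
      · exact Or.inl h
      · right
        refine ⟨hS, hint k h1 h2, ?_, ?_⟩
        · rw [pvLn_mk, pvLn_mk]
        · intro j hj
          rw [PySem.List.mem_pyRange_one] at hj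
          simp only [pvCo_mk] at hj
          rw [pvLn_mk]
          exact hint j (by omega) (by omega)
    · rintro (h | ⟨_, hcS, hlc, hintc⟩)
      · exact Or.inl h
      · right
        rw [pvLn_mk] at hlc hintc
        rw [pvCo_mk] at hintc
        have hbd : a ≤ pvCo H c ∧ pvCo H c ≤ b := by
          constructor
          · by_contra hlt
            apply hnotlow
            have := hintc (a - 1) (by rw [PySem.List.mem_pyRange_one]; omega)
            exact this
          · by_contra hgt
            apply hnothigh
            have := hintc (b + 1) (by rw [PySem.List.mem_pyRange_one]; omega)
            exact this
        refine ⟨pvCo H c, hbd.1, hbd.2, ?_⟩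
        rw [hlc, pvMk_ln_co]
  | case2 c0 queue visited qv IH =>
    intro a b ha hb hint hvisited hqueue hqa hqb
    simp only [qv] at IH
    obtain ⟨y, hya, hyb, hc0⟩ := hqueue c0 List.mem_cons_self
    have hdisj : ∀ k, a ≤ k → k ≤ b → pvMk H l k ∉ V :=
      interval_not_in_V H S V l y0 a b hclo hsV ha hb hint
    -- (i) interval members are visited
    have hInVis : ∀ k, a ≤ k → k ≤ b → pvMk H l k ∈ visited := by
      intro k h1 h2
      exact (hvisited _).mpr (Or.inr ⟨k, h1, h2, rfl⟩)
    -- (ii) a line element just outside the interval and outside V is unvisited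
    have hOut : ∀ k, pvMk H l k ∉ V → ¬ (a ≤ k ∧ k ≤ b) → pvMk H l k ∉ visited := by
      intro k hkV hkout hk
      rcases (hvisited _).mp hk with hV | ⟨k', h1, h2, he⟩
      · exact hkV hV
      · have := (pvMk_inj H).mp he
        omega
    -- an element just below the interval is not in V (closure would pull mk l a into V)
    have hlowV : pvMk H l (a - 1) ∈ S → pvMk H l (a - 1) ∉ V := by
      intro hS' hV'
      apply hdisj a le_rfl (by omega)
      apply hclo _ hV' _ (hint a le_rfl (by omega))
      left
      rw [pvLn_mk, pvCo_mk]
      congr 1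
      omega
    have hhighV : pvMk H l (b + 1) ∈ S → pvMk H l (b + 1) ∉ V := by
      intro hS' hV'
      apply hdisj b (by omega) le_rfl
      apply hclo _ hV' _ (hint b (by omega) le_rfl)
      right
      rw [pvLn_mk, pvCo_mk]
      congr 1
      omega
    have hnb : pvNbrs H c0 = [pvMk H l (y + 1), pvMk H l (y - 1)] := by
      rw [hc0, pvNbrs_eq, pvLn_mk, pvCo_mk]
    rw [pvBfs]
    simp only [hnb, List.foldl_cons, List.foldl_nil] at IH ⊢
    have e1 : pvPush S (queue, visited) (pvMk H l (y + 1))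
        = if pvMk H l (y + 1) ∈ S ∧ pvMk H l (y + 1) ∉ visited
          then (queue ++ [pvMk H l (y + 1)], PySem.Set.add visited (pvMk H l (y + 1))) else (queue, visited) := rfl
    by_cases h1 : pvMk H l (y + 1) ∈ S ∧ pvMk H l (y + 1) ∉ visited
    case pos =>
      -- upward extension: y must be b
      have hyB : y = b := by
        by_contra hne
        exact h1.2 (hInVis (y + 1) (by omega) (by omega))
      subst hyB
      rw [e1, if_pos h1] at IH ⊢
      have hv1 : PySem.Set.add visited (pvMk H l (y + 1)) = visited ++ [pvMk H l (y + 1)] := by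
        simp [PySem.Set.add, h1.2]
      rw [hv1] at IH ⊢
      by_cases h2 : pvMk H l (y - 1) ∈ S ∧ pvMk H l (y - 1) ∉ visited ++ [pvMk H l (y + 1)]
      case pos =>
        -- downward extension too: y must also be a
        have hyA : y = a := by
          by_contra hne
          apply h2.2
          rw [List.mem_append]
          exact Or.inl (hInVis (y - 1) (by omega) (by omega))
        have e2 : pvPush S (queue ++ [pvMk H l (y + 1)], visited ++ [pvMk H l (y + 1)]) (pvMk H l (y - 1))
            = ((queue ++ [pvMk H l (y + 1)]) ++ [pvMk H l (y - 1)],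
               PySem.Set.add (visited ++ [pvMk H l (y + 1)]) (pvMk H l (y - 1))) := by
          simp only [pvPush, if_pos h2]
        have hv2 : PySem.Set.add (visited ++ [pvMk H l (y + 1)]) (pvMk H l (y - 1))
            = (visited ++ [pvMk H l (y + 1)]) ++ [pvMk H l (y - 1)] := by
          simp [PySem.Set.add, h2.2]
        rw [e2, hv2] at IH ⊢
        apply IH (y - 1) (y + 1) (by omega) (by omega)
        · intro k hk1 hk2
          rcases eq_or_lt_of_le hk1 with he | hlt
          · rw [← he]; exact h2.1
          rcases eq_or_lt_of_le hk2 with he | hlt2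
          · rw [he]; exact h1.1
          · exact hint k (by omega) (by omega)
        · intro c
          simp only [List.mem_append, List.mem_singleton]
          rw [show (c ∈ visited ↔ (c ∈ V ∨ ∃ k, a ≤ k ∧ k ≤ y ∧ c = pvMk H l k)) from hvisited c]
          constructor
          · rintro (((h | ⟨k, hk1, hk2, rfl⟩) | rfl) | rfl)
            · exact Or.inl h
            · exact Or.inr ⟨k, by omega, by omega, rfl⟩
            · exact Or.inr ⟨y + 1, by omega, by omega, rfl⟩
            · exact Or.inr ⟨y - 1, by omega, by omega, rfl⟩
          · rintro (h | ⟨k, hk1, hk2, rfl⟩)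
            · exact Or.inl (Or.inl (Or.inl h))
            · by_cases hkb : k = y + 1
              · subst hkb; tauto
              · by_cases hkb' : k = y - 1
                · subst hkb'; tauto
                · exact Or.inl (Or.inl (Or.inr ⟨k, by omega, by omega, rfl⟩))
        · intro c hc
          simp only [List.mem_append, List.mem_singleton] at hc
          rcases hc with (hc | rfl) | rfl
          · obtain ⟨k, hk1, hk2, rfl⟩ := hqueue c (List.mem_cons_of_mem _ hc)
            exact ⟨k, by omega, by omega, rfl⟩
          · exact ⟨y + 1, by omega, by omega, rfl⟩
          · exact ⟨y - 1, by omega, by omega, rfl⟩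
        · intro _
          simp only [List.mem_append, List.mem_singleton]
          tauto
        · intro _
          simp only [List.mem_append, List.mem_singleton]
          tauto
      case neg =>
        have e2 : pvPush S (queue ++ [pvMk H l (y + 1)], visited ++ [pvMk H l (y + 1)]) (pvMk H l (y - 1))
            = (queue ++ [pvMk H l (y + 1)], visited ++ [pvMk H l (y + 1)]) := by
          simp only [pvPush, if_neg h2]
        rw [e2] at IH ⊢
        apply IH a (y + 1) (by omega) (by omega)
        · intro k hk1 hk2
          rcases eq_or_lt_of_le hk2 with he | hlt
          · rw [he]; exact h1.1
          · exact hint k (by omega) (by omega)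
        · intro c
          simp only [List.mem_append, List.mem_singleton]
          rw [show (c ∈ visited ↔ (c ∈ V ∨ ∃ k, a ≤ k ∧ k ≤ y ∧ c = pvMk H l k)) from hvisited c]
          constructor
          · rintro ((h | ⟨k, hk1, hk2, rfl⟩) | rfl)
            · exact Or.inl h
            · exact Or.inr ⟨k, by omega, by omega, rfl⟩
            · exact Or.inr ⟨y + 1, by omega, by omega, rfl⟩
          · rintro (h | ⟨k, hk1, hk2, rfl⟩)
            · exact Or.inl (Or.inl h)
            · by_cases hkb : k = y + 1
              · subst hkb; tauto
              · exact Or.inl (Or.inr ⟨k, by omega, by omega, rfl⟩)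
        · intro c hc
          rcases List.mem_append.mp hc with hc | hc
          · obtain ⟨k, hk1, hk2, rfl⟩ := hqueue c (List.mem_cons_of_mem _ hc)
            exact ⟨k, by omega, by omega, rfl⟩
          · rw [List.mem_singleton.mp hc]
            exact ⟨y + 1, by omega, by omega, rfl⟩
        · -- low endpoint: unchanged; if it is the popped head, the downward branch would have fired
          intro hS'
          rcases List.mem_cons.mp (hqa hS') with he | hq
          · exfalso
            rw [hc0] at he
            have hyA : a = y := by
              have := (pvMk_inj H).mp he
              omega
            apply h2
            constructor
            · rw [show y - 1 = a - 1 by omega]; exact hS'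
            · rw [List.mem_append]
              rintro (hin | hin)
              · refine hOut (y - 1) ?_ (by omega) hin
                rw [show y - 1 = a - 1 by omega]
                exact hlowV hS'
              · rw [List.mem_singleton] at hin
                have := (pvMk_inj H).mp hin
                omega
          · exact List.mem_append_left _ hq
        · intro _
          exact List.mem_append_right _ (List.mem_singleton_self _)
    case neg =>
      rw [e1, if_neg h1] at IH ⊢
      by_cases h2 : pvMk H l (y - 1) ∈ S ∧ pvMk H l (y - 1) ∉ visited
      case pos =>
        have hyA : y = a := by
          by_contra hne
          exact h2.2 (hInVis (y - 1) (by omega) (by omega))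
        subst hyA
        have e2 : pvPush S (queue, visited) (pvMk H l (y - 1))
            = (queue ++ [pvMk H l (y - 1)], PySem.Set.add visited (pvMk H l (y - 1))) := by
          simp only [pvPush, if_pos h2]
        have hv2 : PySem.Set.add visited (pvMk H l (y - 1)) = visited ++ [pvMk H l (y - 1)] := by
          simp [PySem.Set.add, h2.2]
        rw [e2, hv2] at IH ⊢
        apply IH (y - 1) b (by omega) (by omega)
        · intro k hk1 hk2
          rcases eq_or_lt_of_le hk1 with he | hlt
          · rw [← he]; exact h2.1
          · exact hint k (by omega) (by omega)
        · intro c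
          simp only [List.mem_append, List.mem_singleton]
          rw [show (c ∈ visited ↔ (c ∈ V ∨ ∃ k, y ≤ k ∧ k ≤ b ∧ c = pvMk H l k)) from hvisited c]
          constructor
          · rintro ((h | ⟨k, hk1, hk2, rfl⟩) | rfl)
            · exact Or.inl h
            · exact Or.inr ⟨k, by omega, by omega, rfl⟩
            · exact Or.inr ⟨y - 1, by omega, by omega, rfl⟩
          · rintro (h | ⟨k, hk1, hk2, rfl⟩)
            · exact Or.inl (Or.inl h)
            · by_cases hka : k = y - 1
              · subst hka; tauto
              · exact Or.inl (Or.inr ⟨k, by omega, by omega, rfl⟩)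
        · intro c hc
          rcases List.mem_append.mp hc with hc | hc
          · obtain ⟨k, hk1, hk2, rfl⟩ := hqueue c (List.mem_cons_of_mem _ hc)
            exact ⟨k, by omega, by omega, rfl⟩
          · rw [List.mem_singleton.mp hc]
            exact ⟨y - 1, by omega, by omega, rfl⟩
        · intro _
          exact List.mem_append_right _ (List.mem_singleton_self _)
        · -- high endpoint: unchanged; if it is the popped head, the upward branch would have fired
          intro hS'
          rcases List.mem_cons.mp (hqb hS') with he | hq
          · exfalso
            rw [hc0] at he
            have hyB : b = y := by
              have := (pvMk_inj H).mp he
              omega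
            apply h1
            constructor
            · rw [show y + 1 = b + 1 by omega]; exact hS'
            · refine hOut (y + 1) ?_ (by omega) 
              rw [show y + 1 = b + 1 by omega]
              exact hhighV hS'
          · exact List.mem_append_left _ hq
      case neg =>
        have e2 : pvPush S (queue, visited) (pvMk H l (y - 1)) = (queue, visited) := by
          simp only [pvPush, if_neg h2]
        rw [e2] at IH ⊢
        apply IH a b ha hb hint hvisited
        · intro c hc
          obtain ⟨k, hk1, hk2, rfl⟩ := hqueue c (List.mem_cons_of_mem _ hc)
          exact ⟨k, by omega, by omega, rfl⟩
        · intro hS'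
          rcases List.mem_cons.mp (hqa hS') with he | hq
          · exfalso
            rw [hc0] at he
            have hyA : a = y := (by have := (pvMk_inj H).mp he; omega)
            apply h2
            constructor
            · rw [show y - 1 = a - 1 by omega]; exact hS'
            · refine hOut (y - 1) ?_ (by omega)
              rw [show y - 1 = a - 1 by omega]
              exact hlowV hS'
          · exact hq
        · intro hS'
          rcases List.mem_cons.mp (hqb hS') with he | hq
          · exfalso
            rw [hc0] at he
            have hyB : b = y := (by have := (pvMk_inj H).mp he; omega)
            apply h1
            constructor
            · rw [show y + 1 = b + 1 by omega]; exact hS'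
            · refine hOut (y + 1) ?_ (by omega)
              rw [show y + 1 = b + 1 by omega]
              exact hhighV hS'
          · exact hq

-- set of sides already covered by processed prefix pr of the iteration
def Covered (H : Bool) (S pr : List (Int × Int)) (c : Int × Int) : Prop :=
  ∃ p ∈ pr, SameRun H S c p

-- executable form of Covered
def coveredB (H : Bool) (S pr : List (Int × Int)) (c : Int × Int) : Bool :=
  pr.any (fun p => sameRunB H S c p)

theorem coveredB_iff (H : Bool) (S pr : List (Int × Int)) (c : Int × Int) :
    coveredB H S pr c = true ↔ Covered H S pr c := by
  unfold coveredB Covered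
  simp [List.any_eq_true, sameRunB_iff]

-- number of run starts covered by pr
def pvN (H : Bool) (S pr : List (Int × Int)) : ℕ :=
  (S.filter (fun c => decide (pvMk H (pvLn H c) (pvCo H c - 1) ∉ S))).countP
    (fun t => coveredB H S pr t)

theorem countP_flip_one {α : Type} [DecidableEq α] (l : List α) (p q : α → Bool) (t0 : α)
    (hnd : l.Nodup) (ht0 : t0 ∈ l) (hp : p t0 = false) (hq : q t0 = true)
    (hrest : ∀ x ∈ l, x ≠ t0 → q x = p x) : l.countP q = l.countP p + 1 := by
  induction l with
  | nil => simp at ht0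
  | cons a l ih =>
    simp only [List.countP_cons]
    rcases List.mem_cons.mp ht0 with rfl | hmem
    · have : l.countP q = l.countP p := by
        apply List.countP_congr
        intro x hx
        have : x ≠ t0 := by rintro rfl; exact (List.nodup_cons.mp hnd).1 hx
        rw [hrest x (List.mem_cons_of_mem _ hx) this]
      simp [this, hp, hq]
    · have hane : a ≠ t0 := by rintro rfl; exact (List.nodup_cons.mp hnd).1 hmem
      rw [hrest a List.mem_cons_self hane,
        ih (List.nodup_cons.mp hnd).2 hmem (fun x hx h => hrest x (List.mem_cons_of_mem _ hx) h)]
      omega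

theorem covered_append {H : Bool} {S pr : List (Int × Int)} {s c : Int × Int} :
    Covered H S (pr ++ [s]) c ↔ Covered H S pr c ∨ SameRun H S c s := by
  unfold Covered
  constructor
  · rintro ⟨p, hp, hsr⟩
    rcases List.mem_append.mp hp with h | h
    · exact Or.inl ⟨p, h, hsr⟩
    · rw [List.mem_singleton.mp h] at hsr; exact Or.inr hsr
  · rintro (⟨p, hp, hsr⟩ | h)
    · exact ⟨p, List.mem_append_left _ hp, hsr⟩
    · exact ⟨s, List.mem_append_right _ (List.mem_singleton_self _), h⟩

theorem countLoop_char (H : Bool) (S : List (Int × Int)) (hnd : S.Nodup) :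
    ∀ (todo pr visited : List (Int × Int)) (cnt : Int),
      (∀ c ∈ todo, c ∈ S) →
      (∀ c, c ∈ visited ↔ Covered H S pr c) →
      pvCountLoop S H todo visited cnt = cnt + (pvN H S (pr ++ todo) : Int) - (pvN H S pr : Int) := by
  intro todo
  induction todo with
  | nil => intro pr visited cnt _ _; simp [pvCountLoop]
  | cons s rest ih =>
    intro pr visited cnt hsub hvis
    have hsS : s ∈ S := hsub s List.mem_cons_self
    have happ : pr ++ s :: rest = (pr ++ [s]) ++ rest := by simp
    rw [pvCountLoop, happ]
    by_cases hmem : s ∈ visited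
    · rw [if_pos hmem]
      have hcov : Covered H S pr s := (hvis s).mp hmem
      have hvis' : ∀ c, c ∈ visited ↔ Covered H S (pr ++ [s]) c := by
        intro c
        rw [hvis c, covered_append]
        constructor
        · exact Or.inl
        · rintro (h | h)
          · exact h
          · obtain ⟨p, hp, hsp⟩ := hcov
            exact ⟨p, hp, h.trans hsp⟩
      have hNeq : pvN H S (pr ++ [s]) = pvN H S pr := by
        unfold pvN
        apply List.countP_congr
        intro t _
        rw [coveredB_iff, coveredB_iff]
        constructor
        · rintro h
          rcases covered_append.mp h with h | h
          · exact h
          · obtain ⟨p, hp, hsp⟩ := hcov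
            exact ⟨p, hp, h.trans hsp⟩
        · rintro h
          exact covered_append.mpr (Or.inl h)
      rw [ih (pr ++ [s]) visited cnt (fun c h => hsub c (List.mem_cons_of_mem _ h)) hvis', hNeq]
    · rw [if_neg hmem]
      have hmk : pvMk H (pvLn H s) (pvCo H s) = s := pvMk_ln_co H s
      have hclo : ∀ c ∈ visited, ∀ d ∈ S,
          (d = pvMk H (pvLn H c) (pvCo H c + 1) ∨ d = pvMk H (pvLn H c) (pvCo H c - 1)) → d ∈ visited := by
        intro c hc d hd hadj
        obtain ⟨p, hp, hsr⟩ := (hvis c).mp hc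
        have hdc : SameRun H S d c := (sameRun_adj hsr.1 hd hadj).symm
        exact (hvis d).mpr ⟨p, hp, hdc.trans hsr⟩
      have hbfs := bfs_char H S visited (pvLn H s) (pvCo H s) (by rw [hmk]; exact hsS) hclo (by rwa [hmk])
        [s] (PySem.Set.add visited s) (pvCo H s) (pvCo H s) le_rfl le_rfl
        (by intro k h1 h2
            have : k = pvCo H s := by omega
            rw [this, hmk]; exact hsS)
        (by intro c
            rw [PySem.Set.mem_add]
            constructor
            · rintro (h | he)
              · exact (Or.inl h)
              · exact Or.inr ⟨pvCo H s, le_rfl, le_rfl, by rw [he]; exact hmk.symm⟩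
            · rintro (h | ⟨k, h1, h2, rfl⟩)
              · exact Or.inl h
              · right
                have hk : k = pvCo H s := by omega
                rw [hk, hmk])
        (by intro c hc
            rw [List.mem_singleton.mp hc]
            exact ⟨pvCo H s, le_rfl, le_rfl, hmk.symm⟩)
        (by intro _; rw [hmk]; exact List.mem_singleton_self _)
        (by intro _; rw [hmk]; exact List.mem_singleton_self _)
      have hvis' : ∀ c, c ∈ pvBfs S H [s] (PySem.Set.add visited s) ↔ Covered H S (pr ++ [s]) c := by
        intro c
        rw [hbfs c, hvis c, covered_append, hmk]
        constructor
        · rintro (h | h)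
          · exact Or.inl h
          · exact Or.inr h.symm
        · rintro (h | h)
          · exact Or.inl h
          · exact Or.inr h.symm
      obtain ⟨t0, hrun, hstart⟩ := run_start_exists H S s hsS
      have hN1 : pvN H S (pr ++ [s]) = pvN H S pr + 1 := by
        unfold pvN
        apply countP_flip_one _ _ _ t0 (List.Nodup.filter _ hnd)
        · rw [List.mem_filter]
          exact ⟨hrun.2.1, by simpa using hstart⟩
        · rw [← Bool.not_eq_true, coveredB_iff]
          rintro ⟨p, hp, hsr⟩
          exact hmem ((hvis s).mpr ⟨p, hp, hrun.trans hsr⟩)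
        · rw [coveredB_iff]
          exact ⟨s, List.mem_append_right _ (List.mem_singleton_self _), hrun.symm⟩
        · intro t ht htne
          have htstart : pvMk H (pvLn H t) (pvCo H t - 1) ∉ S := by
            simpa using (List.mem_filter.mp ht).2
          apply Bool.eq_iff_iff.mpr
          simp only [coveredB_iff]
          constructor
          · rintro h
            rcases covered_append.mp h with h | h
            · exact h
            · exact absurd (start_unique htstart hstart (h.trans hrun)) htne
          · rintro h
            exact covered_append.mpr (Or.inl h)
      rw [ih (pr ++ [s]) _ (cnt + 1) (fun c h => hsub c (List.mem_cons_of_mem _ h)) hvis', hN1]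
      push_cast
      ring

theorem countContinuous_eq (H : Bool) (S : List (Int × Int)) (hnd : S.Nodup) :
    pvCountContinuous S H = (S.countP (fun c => decide (pvMk H (pvLn H c) (pvCo H c - 1) ∉ S)) : Int) := by
  unfold pvCountContinuous
  have h := countLoop_char H S hnd S [] PySem.Set.empty 0 (fun _ h => h)
    (by intro c
        simp [PySem.Set.empty, Covered])
  rw [h]
  have hN0 : pvN H S [] = 0 := by
    unfold pvN
    apply List.countP_eq_zero.mpr
    intro t _
    simp [coveredB]
  have hNS : pvN H S ([] ++ S) = S.countP (fun c => decide (pvMk H (pvLn H c) (pvCo H c - 1) ∉ S)) := by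
    unfold pvN
    rw [List.nil_append]
    rw [List.countP_eq_length.mpr, List.countP_eq_length_filter]
    intro t ht
    have htS : t ∈ S := (List.mem_filter.mp ht).1
    rw [coveredB_iff]
    exact ⟨t, htS, SameRun.refl H S htS⟩
  rw [hN0, hNS]
  push_cast
  ring

theorem pvMarkStep_nodup (grid : List (List String)) (rows cols : Int)
    (st : PySem.Set (Int × Int) × PySem.Set (Int × Int)) (c : Int × Int)
    (h1 : st.1.Nodup) (h2 : st.2.Nodup) :
    (pvMarkStep grid rows cols st c).1.Nodup ∧ (pvMarkStep grid rows cols st c).2.Nodup := by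
  unfold pvMarkStep
  dsimp only
  constructor <;> (split_ifs <;> (repeat' apply PySem.Set.nodup_add) <;> assumption)

theorem pvMark_nodup (region_cells : List (Int × Int)) (grid : List (List String)) :
    (pvMark region_cells grid).1.Nodup ∧ (pvMark region_cells grid).2.Nodup := by
  unfold pvMark
  have : ∀ (l : List (Int × Int)) (st : PySem.Set (Int × Int) × PySem.Set (Int × Int)),
      st.1.Nodup → st.2.Nodup →
      (l.foldl (pvMarkStep grid (grid.length : Int) (((PySem.List.pyGet? grid 0).getD []).length : Int)) st).1.Nodup ∧
      (l.foldl (pvMarkStep grid (grid.length : Int) (((PySem.List.pyGet? grid 0).getD []).length : Int)) st).2.Nodup := by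
    intro l
    induction l with
    | nil => intro st h1 h2; exact ⟨h1, h2⟩
    | cons c l ih =>
      intro st h1 h2
      rw [List.foldl_cons]
      obtain ⟨g1, g2⟩ := pvMarkStep_nodup grid _ _ st c h1 h2
      exact ih _ g1 g2
  exact this region_cells (PySem.Set.empty, PySem.Set.empty) List.nodup_nil List.nodup_nil

-- A's mark step adds exactly B's per-cell edge lists
theorem mem_ite_add (P : Prop) [Decidable P] (s : PySem.Set (Int × Int)) (a x : Int × Int) :
    (x ∈ (if P then PySem.Set.add s a else s)) ↔ x ∈ s ∨ (P ∧ x = a) := by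
  split_ifs with h
  · rw [PySem.Set.mem_add]; tauto
  · tauto

theorem mem_ite_single (P Q : Prop) [Decidable P] [Decidable Q] (a b x : Int × Int) :
    (x ∈ (if P then [a] else []) ++ (if Q then [b] else ([] : List (Int × Int)))) ↔
      (P ∧ x = a) ∨ (Q ∧ x = b) := by
  rw [List.mem_append]
  split_ifs with h h' <;> simp <;> tauto

theorem pvMarkStep_mem (grid : List (List String)) (rows cols : Int)
    (st : PySem.Set (Int × Int) × PySem.Set (Int × Int)) (c : Int × Int) (x : Int × Int) :
    (x ∈ (pvMarkStep grid rows cols st c).1 ↔ x ∈ st.1 ∨ x ∈ pvHEdges grid cols c) ∧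
    (x ∈ (pvMarkStep grid rows cols st c).2 ↔ x ∈ st.2 ∨ x ∈ pvVEdges grid rows c) := by
  unfold pvMarkStep pvHEdges pvVEdges
  dsimp only
  constructor
  · rw [mem_ite_add, mem_ite_add, mem_ite_single]; tauto
  · rw [mem_ite_add, mem_ite_add, mem_ite_single]; tauto

set_option maxHeartbeats 1000000 in
theorem pvMark_mem (region_cells : List (Int × Int)) (grid : List (List String)) (x : Int × Int) :
    (x ∈ (pvMark region_cells grid).1 ↔
        x ∈ region_cells.flatMap (pvHEdges grid (((PySem.List.pyGet? grid 0).getD []).length : Int))) ∧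
    (x ∈ (pvMark region_cells grid).2 ↔
        x ∈ region_cells.flatMap (pvVEdges grid (grid.length : Int))) := by
  unfold pvMark
  have key : ∀ (l : List (Int × Int)) (st : PySem.Set (Int × Int) × PySem.Set (Int × Int)),
      (x ∈ (l.foldl (pvMarkStep grid (grid.length : Int) (((PySem.List.pyGet? grid 0).getD []).length : Int)) st).1 ↔
        x ∈ st.1 ∨ x ∈ l.flatMap (pvHEdges grid (((PySem.List.pyGet? grid 0).getD []).length : Int))) ∧
      (x ∈ (l.foldl (pvMarkStep grid (grid.length : Int) (((PySem.List.pyGet? grid 0).getD []).length : Int)) st).2 ↔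
        x ∈ st.2 ∨ x ∈ l.flatMap (pvVEdges grid (grid.length : Int))) := by
    intro l
    induction l with
    | nil => intro st; simp
    | cons c l ih =>
      intro st
      rw [List.foldl_cons]
      obtain ⟨ih1, ih2⟩ := ih (pvMarkStep grid (grid.length : Int) (((PySem.List.pyGet? grid 0).getD []).length : Int) st c)
      obtain ⟨s1, s2⟩ := pvMarkStep_mem grid (grid.length : Int) (((PySem.List.pyGet? grid 0).getD []).length : Int) st c x
      constructor
      · rw [ih1, s1, List.flatMap_cons, List.mem_append]; tauto
      · rw [ih2, s2, List.flatMap_cons, List.mem_append]; tauto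
  obtain ⟨k1, k2⟩ := key region_cells (PySem.Set.empty, PySem.Set.empty)
  constructor
  · rw [k1]; simp [PySem.Set.empty]
  · rw [k2]; simp [PySem.Set.empty]

-- countP agrees on two duplicate-free lists with the same members,
-- even when the predicates only agree pointwise
theorem countP_eq_of_same_mem (l l' : List (Int × Int)) (p q : (Int × Int) → Bool)
    (hl : l.Nodup) (hl' : l'.Nodup) (hmem : ∀ x, x ∈ l ↔ x ∈ l')
    (hpq : ∀ x, p x = q x) : l.countP p = l'.countP q := by
  have hperm : l.Perm l' := (List.perm_ext_iff_of_nodup hl hl').mpr hmem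
  cases funext hpq
  exact hperm.countP_eq p

-- ===== VERDICT (by name: the statement is the Claim_ definition above) =====
theorem calculate_sides_and_area_spec : Claim_equal_calculate_sides_and_area := by
  intro region_cells grid _ _
  unfold Spec_calculate_sides_and_area calculate_sides_and_area calculate_sides_and_area_alt
  dsimp only
  obtain ⟨h1, h2⟩ := pvMark_nodup region_cells grid
  rw [countContinuous_eq true _ h1, countContinuous_eq false _ h2]
  have memH := fun x => (pvMark_mem region_cells grid x).1
  have memV := fun x => (pvMark_mem region_cells grid x).2
  have eT : ∀ x : Int × Int, pvMk true (pvLn true x) (pvCo true x - 1) = (x.1, x.2 - 1) :=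
    fun x => rfl
  have eF : ∀ x : Int × Int, pvMk false (pvLn false x) (pvCo false x - 1) = (x.1 - 1, x.2) :=
    fun x => rfl
  have cH : (pvMark region_cells grid).1.countP
      (fun c => decide (pvMk true (pvLn true c) (pvCo true c - 1) ∉ (pvMark region_cells grid).1))
      = (PySem.Set.ofList (region_cells.flatMap (pvHEdges grid (((PySem.List.pyGet? grid 0).getD []).length : Int)))).countP
        (fun c => decide ((c.1, c.2 - 1) ∉ PySem.Set.ofList (region_cells.flatMap (pvHEdges grid (((PySem.List.pyGet? grid 0).getD []).length : Int))))) := by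
    apply countP_eq_of_same_mem _ _ _ _ h1 (PySem.Set.nodup_ofList _)
    · intro x; rw [memH x, PySem.Set.mem_ofList]
    · intro x
      rw [eT x, decide_eq_decide, not_iff_not, memH (x.1, x.2 - 1), PySem.Set.mem_ofList]
  have cV : (pvMark region_cells grid).2.countP
      (fun c => decide (pvMk false (pvLn false c) (pvCo false c - 1) ∉ (pvMark region_cells grid).2))
      = (PySem.Set.ofList (region_cells.flatMap (pvVEdges grid (grid.length : Int)))).countP
        (fun c => decide ((c.1 - 1, c.2) ∉ PySem.Set.ofList (region_cells.flatMap (pvVEdges grid (grid.length : Int))))) := by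
    apply countP_eq_of_same_mem _ _ _ _ h2 (PySem.Set.nodup_ofList _)
    · intro x; rw [memV x, PySem.Set.mem_ofList]
    · intro x
      rw [eF x, decide_eq_decide, not_iff_not, memV (x.1 - 1, x.2), PySem.Set.mem_ofList]
  rw [cH, cV]
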